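-- pv_equiv track=rewrite | github.com/apcooley/grafty | grafty/parsers/markdown_ts.py | _compute_heading_extent
-- ===== SOURCE A (Python) =====
-- def _compute_heading_extent(
--
--     content: str,
--     start_line: int,
--     level: int,
-- ) -> int:
--     """
--     Compute end line of a heading section.
--     Extent: from start_line to next heading of same/higher level (or EOF).
--     Lines are 1-indexed.
--     Properly handles code fences: ignores # lines inside code blocks.
--     """
--     lines = content.splitlines()
--     in_code_fence = False
--     fence_delimiter = None
--
--     for i in range(start_line, len(lines)):
--         line = lines[i]
--         stripped = line.strip()
--
--         # Check for code fence markers (``` or ~~~)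
--         if stripped.startswith("```") or stripped.startswith("~~~"):
--             if not in_code_fence:
--                 in_code_fence = True
--                 fence_delimiter = stripped[0]  # '`' or '~'
--             elif stripped.startswith(fence_delimiter * 3):
--                 in_code_fence = False
--                 fence_delimiter = None
--             # Skip further checks for this line
--             continue
--
--         # Only check for headings if NOT inside a code fence
--         if not in_code_fence and line.startswith("#"):
--             # Count leading #'s
--             heading_level = 0
--             for char in line:
--                 if char == "#":
--                     heading_level += 1
--                 else:
--                     break
--
--             # If same or higher level (lower or equal #'s), this is the boundary
--             if heading_level <= level:
--                 return i  # (end_line is 1-indexed, inclusive, so return i)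
--
--     # No next heading found; extent to EOF
--     return len(lines)
-- ===== SOURCE B (Python) =====
-- def _compute_heading_extent(
--     content: str,
--     start_line: int,
--     level: int,
-- ) -> int:
--     lines = content.splitlines()
--     n = len(lines)
--     # Pass 1: run the code-fence state machine once, marking which lines are
--     # candidate heading positions (outside any fence and not a fence marker).
--     candidate = []
--     fence = None
--     for i in range(start_line, n):
--         stripped = lines[i].strip()
--         if stripped[:3] in ("```", "~~~"):
--             if fence is None:
--                 fence = stripped[0]
--             elif stripped.startswith(fence * 3):
--                 fence = None
--             candidate.append(False)
--         else:
--             candidate.append(fence is None)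
--     # Pass 2: first candidate line that is a heading of level <= `level`.
--     for k, i in enumerate(range(start_line, n)):
--         if candidate[k]:
--             line = lines[i]
--             if line.startswith("#") and len(line) - len(line.lstrip("#")) <= level:
--                 return i
--     return n
-- ===== Notes on version B (the rewrite author's own statement) =====
-- stated objective: alternative
-- what changed: Replaces the fused single loop with early return by a two-pass decomposition: one pass runs the code-fence state machine to mark candidate lines, a second pass finds the first candidate heading of level <= level; the leading-'#' count uses len minus lstrip('#') instead of a char loop.
import Mathlib
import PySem

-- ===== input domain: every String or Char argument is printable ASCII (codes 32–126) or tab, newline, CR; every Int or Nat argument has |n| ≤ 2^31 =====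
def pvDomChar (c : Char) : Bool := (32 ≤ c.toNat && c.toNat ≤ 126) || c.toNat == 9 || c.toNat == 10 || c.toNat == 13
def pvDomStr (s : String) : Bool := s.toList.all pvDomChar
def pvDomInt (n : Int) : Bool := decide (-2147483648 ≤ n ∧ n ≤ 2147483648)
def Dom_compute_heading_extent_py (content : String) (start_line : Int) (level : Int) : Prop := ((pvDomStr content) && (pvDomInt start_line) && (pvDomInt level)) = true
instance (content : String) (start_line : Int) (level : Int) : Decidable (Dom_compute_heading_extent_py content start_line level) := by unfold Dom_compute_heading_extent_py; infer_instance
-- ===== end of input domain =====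

-- B replaces A's fused early-return loop by two passes (fence-state marking, then first-match scan);
-- equivalence of the RETURN value is proved on Pre_ (the inputs where A does not raise IndexError).

-- ===== PORT A =====
-- heading_level = 0; for char in line: if '#': +=1 else break
def pvACount : List Char → Int
  | [] => 0
  | c :: cs => if c = '#' then pvACount cs + 1 else 0

-- the for-loop over range(start_line, len(lines)); state (in_code_fence, fence_delimiter);
-- some i = early return, none = loop fell through.
-- lines[i]: pyGet? with default "" — Pre_ guarantees the index is in range;
-- delim.getD '`' in the elif is unreachable with delim = none (Python invariant: in_code_fence → delimiter set).
def pvALoop (lines : List String) (level : Int) : List Int → Bool → Option Char → Option Int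
  | [], _, _ => none
  | i :: rest, inF, delim =>
    let line := (PySem.List.pyGet? lines i).getD ""
    let stripped := PySem.Str.strip line
    if PySem.Str.startswith stripped "```" || PySem.Str.startswith stripped "~~~" then
      if !inF then
        pvALoop lines level rest true (some ((PySem.Str.pyGet? stripped 0).getD '`'))
      else if PySem.Str.startswith stripped (String.mk [delim.getD '`', delim.getD '`', delim.getD '`']) then
        pvALoop lines level rest false none
      else
        pvALoop lines level rest inF delim
    else if !inF && PySem.Str.startswith line "#" then
      if pvACount line.toList ≤ level then some i
      else pvALoop lines level rest inF delim
    else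
      pvALoop lines level rest inF delim

def compute_heading_extent_py (content : String) (start_line : Int) (level : Int) : Int :=
  let lines := PySem.Str.splitlines content
  (pvALoop lines level (PySem.List.pyRange start_line (lines.length : Int) 1) false none).getD (lines.length : Int)

-- ===== PORT B =====
-- pass 1: candidate[k] for each index; fence : Option Char is B's `fence` variable
def pvBCands (lines : List String) : List Int → Option Char → List Bool
  | [], _ => []
  | i :: rest, fence =>
    let stripped := PySem.Str.strip ((PySem.List.pyGet? lines i).getD "")
    if PySem.Str.slice stripped (some 0) (some 3) = "```" ∨ PySem.Str.slice stripped (some 0) (some 3) = "~~~" then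
      match fence with
      | none => false :: pvBCands lines rest (some ((PySem.Str.pyGet? stripped 0).getD '`'))
      | some d =>
        if PySem.Str.startswith stripped (String.mk [d, d, d]) then false :: pvBCands lines rest none
        else false :: pvBCands lines rest fence
    else
      fence.isNone :: pvBCands lines rest fence

-- pass 2: first (i, candidate) with a heading of level <= level; len(line) - len(line.lstrip('#'))
-- ported as dropWhile (· == '#') on the char list (exact for lstrip with the single char '#')
def pvBFind (lines : List String) (level : Int) (n : Int) : List (Int × Bool) → Int
  | [] => n
  | (i, c) :: rest =>
    if c then
      let line := (PySem.List.pyGet? lines i).getD ""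
      if PySem.Str.startswith line "#" &&
         decide ((line.toList.length : Int) - ((line.toList.dropWhile (· == '#')).length : Int) ≤ level) then i
      else pvBFind lines level n rest
    else pvBFind lines level n rest

def compute_heading_extent_py_alt (content : String) (start_line : Int) (level : Int) : Int :=
  let lines := PySem.Str.splitlines content
  let n : Int := lines.length
  let idxs := PySem.List.pyRange start_line n 1
  pvBFind lines level n (idxs.zip (pvBCands lines idxs none))

-- ===== PRECONDITION & SPEC =====
-- Pre_ excludes exactly the inputs where A raises IndexError: start_line below -len(lines),
-- where the first iteration's lines[start_line] is out of range.
def Pre_compute_heading_extent_py (content : String) (start_line : Int) (level : Int) : Prop :=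
  -((PySem.Str.splitlines content).length : Int) ≤ start_line
instance (content : String) (start_line : Int) (level : Int) : Decidable (Pre_compute_heading_extent_py content start_line level) := by unfold Pre_compute_heading_extent_py; infer_instance

def pvWitness_compute_heading_extent_py : String × Int × Int := ("# top\ntext\n## sub\n# next", 0, 1)

def Spec_compute_heading_extent_py (content : String) (start_line : Int) (level : Int) (out : Int) : Prop := out = compute_heading_extent_py_alt content start_line level
instance (content : String) (start_line : Int) (level : Int) (out : Int) : Decidable (Spec_compute_heading_extent_py content start_line level out) := by unfold Spec_compute_heading_extent_py; infer_instance

-- ===== CLAIM (what is proved, stated in full; the proofs are below) =====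
def Claim_equal_compute_heading_extent_py : Prop := ∀ (content : String) (start_line : Int) (level : Int), Dom_compute_heading_extent_py content start_line level → Pre_compute_heading_extent_py content start_line level → Spec_compute_heading_extent_py content start_line level (compute_heading_extent_py content start_line level)

-- ===== LEMMAS AND PROOFS =====

-- B's `stripped[:3] in ("```","~~~")` test agrees with A's startswith pair
lemma pre3_iff (s : String) :
    (PySem.Str.slice s (some 0) (some 3) = "```" ∨ PySem.Str.slice s (some 0) (some 3) = "~~~")
      ↔ (PySem.Str.startswith s "```" || PySem.Str.startswith s "~~~") = true := by
  have h3 : ∀ (t : String), PySem.Str.slice s (some 0) (some 3) = t ↔ s.toList.take 3 = t.toList := by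
    intro t
    constructor
    · intro h; rw [← h]; simp [PySem.Str.toList_slice, PySem.List.slice_zero_start, PySem.List.slice_to]
    · intro h
      apply String.toList_inj.mp
      simp [PySem.Str.toList_slice, PySem.List.slice_zero_start, PySem.List.slice_to, h]
  rw [h3, h3]
  simp only [Bool.or_eq_true, PySem.Str.startswith_eq, PySem.Chars.startswith_iff]
  constructor
  · rintro (h | h) <;> [left; right] <;> (rw [List.prefix_iff_eq_take]; simp [← h])
  · rintro (h | h) <;> [left; right] <;> (rw [List.prefix_iff_eq_take] at h; simp_all)

-- A's char loop equals B's length-difference count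
lemma count_eq (l : List Char) :
    pvACount l = (l.length : Int) - ((l.dropWhile (· == '#')).length : Int) := by
  induction l with
  | nil => simp [pvACount]
  | cons c cs ih =>
    by_cases h : c = '#' <;> simp [pvACount, h, ih] <;> push_cast <;> omega

-- pvBFind on a non-candidate / candidate head
lemma pvBFind_cons_false (lines : List String) (level n i : Int) (rest : List (Int × Bool)) :
    pvBFind lines level n ((i, false) :: rest) = pvBFind lines level n rest := by
  simp [pvBFind]

lemma pvBFind_cons_true (lines : List String) (level n i : Int) (rest : List (Int × Bool)) :
    pvBFind lines level n ((i, true) :: rest)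
      = (if (PySem.Str.startswith ((PySem.List.pyGet? lines i).getD "") "#" &&
             decide (((((PySem.List.pyGet? lines i).getD "").toList.length : Int)
               - ((((PySem.List.pyGet? lines i).getD "").toList.dropWhile (· == '#')).length : Int)) ≤ level)) = true
         then i else pvBFind lines level n rest) := by
  simp [pvBFind]

-- main loop correspondence: A's state (fence.isSome, fence) vs B's fence
lemma loop_eq (lines : List String) (level : Int) (n : Int) :
    ∀ (idxs : List Int) (fence : Option Char),
      (pvALoop lines level idxs fence.isSome fence).getD n
        = pvBFind lines level n (idxs.zip (pvBCands lines idxs fence)) := by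
  intro idxs
  induction idxs with
  | nil => intro fence; simp [pvALoop, pvBCands, pvBFind]
  | cons i rest ih =>
    intro fence
    by_cases hf : (PySem.Str.startswith (PySem.Str.strip ((PySem.List.pyGet? lines i).getD "")) "```"
        || PySem.Str.startswith (PySem.Str.strip ((PySem.List.pyGet? lines i).getD "")) "~~~") = true
    · have hf' := (pre3_iff _).mpr hf
      cases fence with
      | none =>
        simp only [pvALoop, pvBCands, if_pos hf, if_pos hf', Option.isSome_none, Bool.not_false,
          if_true, List.zip_cons_cons, pvBFind_cons_false]
        exact ih (some ((PySem.Str.pyGet? (PySem.Str.strip ((PySem.List.pyGet? lines i).getD "")) 0).getD '`'))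
      | some d =>
        by_cases hc : PySem.Str.startswith (PySem.Str.strip ((PySem.List.pyGet? lines i).getD ""))
            (String.mk [d, d, d]) = true
        · simp only [pvALoop, pvBCands, if_pos hf, if_pos hf', Option.isSome_some, Bool.not_true,
            Bool.false_eq_true, if_false, Option.getD_some, if_pos hc, List.zip_cons_cons,
            pvBFind_cons_false]
          exact ih none
        · simp only [pvALoop, pvBCands, if_pos hf, if_pos hf', Option.isSome_some, Bool.not_true,
            Bool.false_eq_true, if_false, Option.getD_some, if_neg hc, List.zip_cons_cons,
            pvBFind_cons_false]
          exact ih (some d)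
    · have hf' : ¬(PySem.Str.slice (PySem.Str.strip ((PySem.List.pyGet? lines i).getD "")) (some 0) (some 3) = "```"
          ∨ PySem.Str.slice (PySem.Str.strip ((PySem.List.pyGet? lines i).getD "")) (some 0) (some 3) = "~~~") :=
        fun h => hf ((pre3_iff _).mp h)
      cases fence with
      | some d =>
        simp only [pvALoop, pvBCands, if_neg hf, if_neg hf', Option.isSome_some, Bool.not_true,
          Bool.false_and, Bool.false_eq_true, if_false, Option.isNone_some, List.zip_cons_cons,
          pvBFind_cons_false]
        exact ih (some d)
      | none =>
        simp only [pvALoop, pvBCands, if_neg hf, if_neg hf', Option.isSome_none, Bool.not_false,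
          Bool.true_and, Option.isNone_none, List.zip_cons_cons, pvBFind_cons_true]
        by_cases hh : PySem.Str.startswith ((PySem.List.pyGet? lines i).getD "") "#" = true
        · by_cases hl : pvACount ((PySem.List.pyGet? lines i).getD "").toList ≤ level
          · rw [if_pos hh, if_pos hl, if_pos]
            · simp
            · rw [Bool.and_eq_true, decide_eq_true_eq, ← count_eq]
              exact ⟨hh, hl⟩
          · rw [if_pos hh, if_neg hl, if_neg]
            · exact ih none
            · rw [Bool.and_eq_true, decide_eq_true_eq, ← count_eq]
              exact fun h => hl h.2
        · rw [if_neg hh, if_neg]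
          · exact ih none
          · rw [Bool.and_eq_true]
            exact fun h => hh h.1

-- ===== VERDICT (by name: the statement is the Claim_ definition above) =====
theorem compute_heading_extent_py_spec : Claim_equal_compute_heading_extent_py := by
  intro content start_line level _ _
  unfold Spec_compute_heading_extent_py compute_heading_extent_py compute_heading_extent_py_alt
  simpa using loop_eq (PySem.Str.splitlines content) level _ (PySem.List.pyRange start_line _ 1) none
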